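-- pv_equiv track=rewrite | github.com/lancejames221b/agent-hivemind | src/workflow_automation_engine.py | _check_partial_workflow_match
-- ===== SOURCE A (Python) =====
-- from typing import Any, Dict, List, Optional, Tuple, Union
--
-- def _check_partial_workflow_match(recent_commands: List[str], template_commands: List[str]) -> bool:
--     """Check if recent commands represent a partial workflow execution"""
--     if len(recent_commands) < 2:
--         return False
--
--     # Check if recent commands appear in sequence in template
--     for i in range(len(template_commands) - len(recent_commands) + 1):
--         template_slice = template_commands[i:i + len(recent_commands)]
--         if template_slice == recent_commands:
--             return True
--
--     return False
-- ===== SOURCE B (Python) =====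
-- from typing import List
--
-- def _check_partial_workflow_match(recent_commands: List[str], template_commands: List[str]) -> bool:
--     """Check if recent commands represent a partial workflow execution."""
--     if len(recent_commands) < 2:
--         return False
--     # Index the template once: command -> list of positions where it occurs.
--     positions = {}
--     for i, cmd in enumerate(template_commands):
--         positions.setdefault(cmd, []).append(i)
--     k = len(recent_commands)
--     # Probe only the offsets where the first recent command occurs.
--     for i in positions.get(recent_commands[0], []):
--         if template_commands[i:i + k] == recent_commands:
--             return True
--     return False
-- ===== Notes on version B (the rewrite author's own statement) =====
-- stated objective: alternative
-- what changed: B builds a hash index (command -> occurrence positions) over the template once and compares the window only at the positions where the first recent command occurs, instead of A's scan over every window offset.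
import Mathlib
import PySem

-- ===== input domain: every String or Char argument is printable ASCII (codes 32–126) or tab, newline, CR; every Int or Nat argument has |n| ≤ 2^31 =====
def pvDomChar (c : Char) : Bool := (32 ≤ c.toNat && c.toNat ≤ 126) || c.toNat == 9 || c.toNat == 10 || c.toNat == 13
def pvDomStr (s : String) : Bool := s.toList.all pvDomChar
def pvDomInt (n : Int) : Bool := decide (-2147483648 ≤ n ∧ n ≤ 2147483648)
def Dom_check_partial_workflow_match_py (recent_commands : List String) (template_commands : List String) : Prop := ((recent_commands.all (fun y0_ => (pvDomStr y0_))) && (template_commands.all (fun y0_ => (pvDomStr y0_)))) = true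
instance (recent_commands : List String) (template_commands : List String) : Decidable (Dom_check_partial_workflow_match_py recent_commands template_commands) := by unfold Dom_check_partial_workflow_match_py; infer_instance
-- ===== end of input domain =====

-- B replaces A's scan over every window offset by a positions index of the template,
-- probed only at the offsets where the first recent command occurs (objective: alternative).

-- ===== PORT A =====
-- the 'for i in range(...): if template[i:i+len(r)] == r: return True' loop
def pvScanA (recent_commands template_commands : List String) : List Int → Bool
  | [] => false
  | i :: rest =>
    if PySem.List.slice template_commands (some i) (some (i + (recent_commands.length : Int))) = recent_commands
    then true
    else pvScanA recent_commands template_commands rest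

def check_partial_workflow_match_py (recent_commands : List String) (template_commands : List String) : Bool :=
  if (recent_commands.length : Int) < 2 then false
  else pvScanA recent_commands template_commands
    (PySem.List.pyRange 0 ((template_commands.length : Int) - (recent_commands.length : Int) + 1) 1)

-- ===== PORT B =====
-- 'positions = {}; for i, cmd in enumerate(template): positions.setdefault(cmd, []).append(i)'
def pvIndexB (template_commands : List String) : PySem.Dict String (List Int) :=
  (PySem.List.enumerate template_commands 0).foldl
    (fun d p => d.modify p.2 [] (fun l => l ++ [p.1])) PySem.Dict.empty

-- 'for i in positions.get(r[0], []): if template[i:i+k] == r: return True'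
def pvProbeB (recent_commands template_commands : List String) (k : Int) : List Int → Bool
  | [] => false
  | i :: rest =>
    if PySem.List.slice template_commands (some i) (some (i + k)) = recent_commands
    then true
    else pvProbeB recent_commands template_commands k rest

def check_partial_workflow_match_py_alt (recent_commands : List String) (template_commands : List String) : Bool :=
  if (recent_commands.length : Int) < 2 then false
  else
    pvProbeB recent_commands template_commands (recent_commands.length : Int)
      ((pvIndexB template_commands).getD recent_commands.headI [])

-- ===== PRECONDITION & SPEC =====
def Spec_check_partial_workflow_match_py (recent_commands : List String) (template_commands : List String) (out : Bool) : Prop := out = check_partial_workflow_match_py_alt recent_commands template_commands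
instance (recent_commands : List String) (template_commands : List String) (out : Bool) : Decidable (Spec_check_partial_workflow_match_py recent_commands template_commands out) := by unfold Spec_check_partial_workflow_match_py; infer_instance

-- ===== CLAIM (what is proved, stated in full; the proofs are below) =====
def Claim_equal_check_partial_workflow_match_py : Prop := ∀ (recent_commands : List String) (template_commands : List String), Dom_check_partial_workflow_match_py recent_commands template_commands → Spec_check_partial_workflow_match_py recent_commands template_commands (check_partial_workflow_match_py recent_commands template_commands)

-- ===== LEMMAS AND PROOFS =====

-- both loops are 'any' over their index list
theorem pvScanA_eq_any (r t : List String) (l : List Int) :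
    pvScanA r t l = l.any (fun i => PySem.List.slice t (some i) (some (i + (r.length : Int))) = r) := by
  induction l with
  | nil => rfl
  | cons i rest ih => simp [pvScanA, ih]

theorem pvProbeB_eq_any (r t : List String) (l : List Int) :
    pvProbeB r t (r.length : Int) l = l.any (fun i => PySem.List.slice t (some i) (some (i + (r.length : Int))) = r) := by
  induction l with
  | nil => rfl
  | cons i rest ih => simp [pvProbeB, ih]

-- the grouping dict: lookup of the fold gives the filtered positions
theorem pvIndexB_getD (l : List (Int × String)) (d : PySem.Dict String (List Int)) (c : String) :
    (l.foldl (fun d p => d.modify p.2 [] (fun l => l ++ [p.1])) d).getD c []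
      = d.getD c [] ++ (l.filter (fun p => p.2 == c)).map (·.1) := by
  induction l generalizing d with
  | nil => simp
  | cons p rest ih =>
    simp only [List.foldl_cons, ih, List.filter_cons]
    rw [PySem.Dict.getD_modify]
    by_cases h : p.2 = c
    · simp [h]
    · simp [h, Ne.symm h]

-- a window equality pins down the first element and the window's fit
theorem pvWindow_facts (r t : List String) (m : Nat) (a : String) (r' : List String)
    (hr : r = a :: r') (h : (t.drop m).take r.length = r) :
    m + r.length ≤ t.length ∧ t[m]? = some a := by
  have hlen : ((t.drop m).take r.length).length = r.length := by rw [h]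
  simp only [List.length_take, List.length_drop] at hlen
  have hpos : 0 < r.length := by simp [hr]
  have hfit : m + r.length ≤ t.length := by omega
  refine ⟨hfit, ?_⟩
  have hhead : ((t.drop m).take r.length).head? = some a := by rw [h, hr]; rfl
  rw [List.head?_take, if_neg (by omega : ¬ r.length = 0), List.head?_drop] at hhead
  exact hhead

theorem check_partial_workflow_match_eq (r t : List String) :
    check_partial_workflow_match_py r t = check_partial_workflow_match_py_alt r t := by
  unfold check_partial_workflow_match_py check_partial_workflow_match_py_alt
  split_ifs with h2
  · rfl
  · rw [pvScanA_eq_any, pvProbeB_eq_any]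
    obtain ⟨a, r', hr⟩ : ∃ a r', r = a :: r' := by
      cases r with
      | nil => simp at h2
      | cons a r' => exact ⟨a, r', rfl⟩
    have hhead : r.headI = a := by rw [hr]; rfl
    rw [Bool.eq_iff_iff]
    simp only [List.any_eq_true, decide_eq_true_eq]
    unfold pvIndexB
    rw [pvIndexB_getD]
    constructor
    · rintro ⟨i, hi, hP⟩
      rw [PySem.List.mem_pyRange_one] at hi
      -- rewrite the slice with nonnegative bounds
      rw [PySem.List.slice_toNat t hi.1 (by omega)] at hP
      have htoNat : ((i + (r.length : Int)).toNat - i.toNat) = r.length := by omega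
      rw [htoNat] at hP
      obtain ⟨hfit, hget⟩ := pvWindow_facts r t i.toNat a r' hr hP
      refine ⟨i, ?_, ?_⟩
      · simp only [PySem.Dict.getD_empty, List.nil_append, List.mem_map, List.mem_filter]
        have hlt : i.toNat < t.length := by
          have : 0 < r.length := by simp [hr]
          omega
        refine ⟨(i, a), ⟨?_, ?_⟩, rfl⟩
        · rw [PySem.List.mem_enumerate_iff]
          refine ⟨i.toNat, hlt, ?_⟩
          have : t[i.toNat] = a := by
            have := hget; rw [List.getElem?_eq_getElem hlt] at this; simpa using this
          simp [this]; omega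
        · simp [hhead]
      · rw [PySem.List.slice_toNat t hi.1 (by omega), htoNat]; exact hP
    · rintro ⟨i, hi, hP⟩
      simp only [PySem.Dict.getD_empty, List.nil_append, List.mem_map, List.mem_filter] at hi
      obtain ⟨p, ⟨hpe, _⟩, hp1⟩ := hi
      rw [PySem.List.mem_enumerate_iff] at hpe
      obtain ⟨m, hm, hpeq⟩ := hpe
      have hi0 : i = (m : Int) := by rw [← hp1, hpeq]; simp
      have hi0' : (0 : Int) ≤ i := by omega
      rw [PySem.List.slice_toNat t hi0' (by omega)] at hP
      have htoNat : ((i + (r.length : Int)).toNat - i.toNat) = r.length := by omega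
      rw [htoNat] at hP
      obtain ⟨hfit, _⟩ := pvWindow_facts r t i.toNat a r' hr hP
      refine ⟨i, ?_, ?_⟩
      · rw [PySem.List.mem_pyRange_one]
        constructor
        · omega
        · have : i.toNat = m := by omega
          omega
      · rw [PySem.List.slice_toNat t hi0' (by omega), htoNat]; exact hP

-- ===== VERDICT (by name: the statement is the Claim_ definition above) =====
theorem check_partial_workflow_match_py_spec : Claim_equal_check_partial_workflow_match_py := by
  intro r t _
  unfold Spec_check_partial_workflow_match_py
  exact check_partial_workflow_match_eq r t
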